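/-
  THE SPLIT OF decode_residue.7 (path A of decode_residue, `ch > 2`, pass 0; C 2216–2221: the inline `DECODE(q,f,c)` of the
  classification step, `if (q == EOP) goto done`, `part_classdata[0][class_set] = r->classdata[q]`; 0x10f314 … 0x10f4e8).

  The claim `DecodeResidue.Seg7` of Vorbis/Spec/DecodeResidue.lean is unchanged. This file has the assertions at the two cut points
  INSIDE the segment, the frame lemma that carries `Common` over the segment's stores, the three children's claims and the
  composition (pure `ReachVia` logic: no code is walked here).

      segment 7  (0x10f314 … 0x10f4e8)
      At17Mid1                   0x10f36f (`L.decode_residue.chk43`: the check call of `f->acc`), after the join of the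
                                 `prep_huffman` arm: r14 = the class book `c`, r13 = f, rdi = &f->acc
      At17Mid2                   0x10f40d (`L.decode_residue.chk48`: the check call of `c->sparse`), after the join of the three
                                 ends of DECODE_RAW: the scratch slot `[rbp−0xb8]` holds the DECODE_RAW result, rdi = &c->sparse
      Common.tblock_where        where the temp block lies (inside the free part of the arena, off the stack, off `*f`)
      G.footprint_fixed          the stack window, the five windows of `*f` and the arena window are members of the footprint
      Common.carry_decode        COMMON at a later state of the segment: the memory differs below the steady stack pointer, in
                                 the scratch slots `[rbp−0xb8, rbp−0xa8)`, `[rbp−0x98, rbp−0x94)`, in the bit reader's windows of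
                                 `*f` and in the ROWS of the temp block
      At17Mid1.common / At17Mid2.common    COMMON at the two cut points
      Seg7a                      0x10f314 → 0x10f36f: `c = f->codebooks + r->classbook`, `if (f->valid_bits <= 9) prep_huffman(f)`
      Seg7b                      0x10f36f → 0x10f40d: DECODE_RAW (the fast table; `codebook_decode_scalar_raw`; the inline path)
      Seg7c                      0x10f40d → 0x10f692 | 0x10fb14: `if (c->sparse) q = c->sorted_values[q]`, `q == EOP`, the store
      Seg7.of_parts              Seg7a → Seg7b → Seg7c → Seg7

  The two assertions speak of TWO states: `v`, the state at the segment's entry (where `At17 u₀ g cs pcount v` holds: every child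
  has it as a hypothesis), and `s`, the present state. What the loop invariant `DecodeA` says about `v.mem` is carried to the
  exit by the last child (`Fill.frame`, `WInv.frame`), not restated at the cuts.

  Slots as in Vorbis/Spec/DecodeResidue.lean: `rbp = RA − 8`, so `[rbp − X]` is `[g.e.rsp − (X + 8)]`: `[rbp−0xb8]` = RA − 192
  (4 bytes: `q`), `[rbp−0xb0]` = RA − 184 (8 bytes: `f`), `[rbp−0x98]` = RA − 160 (4 bytes: the old `valid_bits`, never read).
-/
import Asan.CheckWalk
import Vorbis.Spec.DecodeResidue
import Vorbis.Spec.DecodeResidueCarry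
namespace Vorbis.Spec
open X86 X86.User Asan

set_option maxRecDepth 4000
set_option maxHeartbeats 4000000

namespace DecodeResidue

/-! ### The frame of the inline DECODE: COMMON over the bit reader's windows and the rows of the temp block -/

/-- **Where the temp block is**: inside the free part `[B + S, B + L)` of the arena (so inside the contract's footprint), the
arena inside `[0x100000, 0xC00000)` and off the stack region `[0x700000, 0x800000)`, off `*f`. -/
theorem Common.tblock_where {u₀ : State} {g : G} {v : State} (hent : Entered u₀ g) (hc : Common u₀ g v) :
    g.A.B + g.A.S ≤ g.TB.base ∧ g.TB.base + g.TB.size ≤ g.A.B + g.A.L ∧ g.A.B + g.A.L ≤ 0xC00000 ∧ 0x100000 ≤ g.A.B ∧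
      (g.A.B + g.A.L ≤ 0x700000 ∨ 0x800000 ≤ g.A.B) ∧
      ((g.e.reg .rdi).toNat + 1808 ≤ g.A.B + g.A.S ∨ g.A.B + g.A.L ≤ (g.e.reg .rdi).toNat) := by
  have hb : ADOBusy g.A' g.others' v.mem g.f g.sz := hc.point.busy
  have hr := hb.ok.tblock_range hc.tblock
  have h2 := hb.ok.AR2
  have h1 := hent.ado.ok.AR1
  have h1x := hent.ado.ok.AR1x
  have hob : g.Blk (objBlock g.f) := hent.vorbis.obj
  have hgap := hent.pre.free.offGap _ hob
  simp only [vblock, voff] at hgap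
  have ef : g.f = (g.e.reg .rdi).toNat := rfl
  rw [ef] at hgap
  have hl := le_r8 g.TB.size
  have esz : g.TB.size = g.sz := rfl
  unfold G.A' at hr h2
  simp only [varena] at hr h2
  rw [esz] at hr hl ⊢
  omega

/-- **The fixed windows of the contract's footprint are members of it**: the stack window `[RA − 848, RA)`, the five windows of
`*f` that the bit reader and `error` write (`[f+48, f+56)`, `[f+84, f+96)`, `[f+132, f+144)`, `[f+1484, f+1749)`,
`[f+1752, f+1784)`) and the free part of the arena `[B + S, B + L)`. -/
theorem G.footprint_fixed (g : G) (w : Span)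
    (h : w = ⟨(g.e.reg .rsp).toNat - 848, (g.e.reg .rsp).toNat⟩ ∨
      w = ⟨(g.e.reg .rdi).toNat + 48, (g.e.reg .rdi).toNat + 56⟩ ∨ w = ⟨(g.e.reg .rdi).toNat + 84, (g.e.reg .rdi).toNat + 96⟩ ∨
      w = ⟨(g.e.reg .rdi).toNat + 132, (g.e.reg .rdi).toNat + 144⟩ ∨
      w = ⟨(g.e.reg .rdi).toNat + 1484, (g.e.reg .rdi).toNat + 1749⟩ ∨
      w = ⟨(g.e.reg .rdi).toNat + 1752, (g.e.reg .rdi).toNat + 1784⟩ ∨ w = ⟨g.A.B + g.A.S, g.A.B + g.A.L⟩) :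
    w ∈ g.spec.footprint g.e := by
  unfold Spec.footprint
  simp only [vspec]
  unfold DecodeResidue.writes
  rcases h with rfl | rfl | rfl | rfl | rfl | rfl | rfl
  · exact List.mem_cons_self
  all_goals
    apply List.mem_cons_of_mem
    apply List.mem_append_left
    simp only [List.mem_cons, true_or, or_true]

/-- **COMMON OVER THE INLINE DECODE** (segments .5 / .7 / .9; not covered by `Common.carry_wins` / `carry_spill` /
`carry_scratch`, whose windows are the own stack and the channel buffers only): COMMON at a later state `s` from COMMON at the
state `v`, when the memory differs only below the steady stack pointer (return addresses of the check calls, the callees' frames),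
in the scratch slots `[rbp−0xb8, rbp−0xa8)` and `[rbp−0x98, rbp−0x94)`, in the bit reader's windows of `*f` (what `prep_huffman`
and `codebook_decode_scalar_raw` may write, and `acc` / `valid_bits` of the inline path) and in the ROWS of the temp block (the
row-pointer table `[TB, TB + 8·C)` at its start is kept: the ninth window is for the slot store `part_classdata[0][class_set] = …`).
Asked: the frame registers, the text, `abiInv`, the slot `[rbp−0xb0] = f` (it lies in a window: the code re-stores it), no shadow
byte written, and `Bits` and `μ` of the new memory (a callee's post, `Reader.reader_of_window`, or `Bits.update` after the inline
path). -/
theorem Common.carry_decode {u₀ : State} {g : G} {v s : State} (hent : Entered u₀ g) (hc : Common u₀ g v)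
    (rsp : s.reg .rsp = g.e.reg .rsp - 248) (rbp : s.reg .rbp = g.e.reg .rsp - 8)
    (code : CodeOK u₀ s.mem) (inv : abiInv s)
    (fr_f : UInt64.ofNat (s.mem.readLE (g.e.reg .rsp - 184) 8) = g.e.reg .rdi)
    (same : Mem.SameExcept
      [⟨(g.e.reg .rsp).toNat - 848, (g.e.reg .rsp).toNat - 248⟩,
       ⟨(g.e.reg .rsp).toNat - 192, (g.e.reg .rsp).toNat - 176⟩,
       ⟨(g.e.reg .rsp).toNat - 160, (g.e.reg .rsp).toNat - 156⟩,
       ⟨(g.e.reg .rdi).toNat + 48, (g.e.reg .rdi).toNat + 56⟩, ⟨(g.e.reg .rdi).toNat + 84, (g.e.reg .rdi).toNat + 96⟩,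
       ⟨(g.e.reg .rdi).toNat + 136, (g.e.reg .rdi).toNat + 144⟩, ⟨(g.e.reg .rdi).toNat + 1484, (g.e.reg .rdi).toNat + 1749⟩,
       ⟨(g.e.reg .rdi).toNat + 1752, (g.e.reg .rdi).toNat + 1784⟩,
       ⟨g.TB.base + 8 * g.C, g.TB.base + g.TB.size⟩] v.mem s.mem)
    (untouched : ShadowUntouched v.mem s.mem)
    (bits : Bits g.Blk g.len s.mem g.f) (mu_le : mu s.mem g.f ≤ mu v.mem g.f) : Common u₀ g s := by
  have hroom := hent.room
  have eR : g.RA = (g.e.reg .rsp).toNat := rfl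
  rw [eR] at hroom
  obtain ⟨hr1, hr2⟩ := hroom
  obtain ⟨t1, t2, t3, t4, t5, t6⟩ := hc.tblock_where hent
  have hob : g.Blk (objBlock g.f) := hent.pre.vorbis.obj
  have hobin := hent.pre.env.ok.inside _ hob
  have hobst := hent.pre.free.offStack _ hob
  simp only [vblock, voff] at hobin hobst
  have ef : g.f = (g.e.reg .rdi).toNat := rfl
  rw [ef] at hobin hobst
  have hsz := hc.tb.size
  have h3 : g.C * (8 + 8 * g.PRD) = g.C * 8 + g.C * (8 * g.PRD) := Nat.mul_add _ _ _
  -- a stack slot outside the three stack windows reads as before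
  have hslot : ∀ (a : Word) (k : Nat),
      ((g.e.reg .rsp).toNat - 248 ≤ a.toNat ∧ a.toNat + k ≤ (g.e.reg .rsp).toNat - 192) ∨
      ((g.e.reg .rsp).toNat - 176 ≤ a.toNat ∧ a.toNat + k ≤ (g.e.reg .rsp).toNat - 160) ∨
      ((g.e.reg .rsp).toNat - 156 ≤ a.toNat ∧ a.toNat + k ≤ (g.e.reg .rsp).toNat) →
      s.mem.readLE a k = v.mem.readLE a k := by
    intro a k ha
    apply same.readLE a k (by omega)
    intro w hw
    simp only [List.mem_cons, List.mem_nil_iff, or_false] at hw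
    rcases hw with rfl | rfl | rfl | rfl | rfl | rfl | rfl | rfl | rfl <;> simp only [] <;> omega
  -- the footprint since the function's entry
  have hfoot : Mem.SameExcept (g.spec.footprint g.e) g.e.mem s.mem := by
    refine Vorbis.Spec.Reader.sameExcept_through_callee hc.same same ?_
    intro w hw
    simp only [List.mem_cons, List.mem_nil_iff, or_false] at hw
    rcases hw with rfl | rfl | rfl | rfl | rfl | rfl | rfl | rfl | rfl
    · exact ⟨_, g.footprint_fixed _ (Or.inl rfl), by simp only []; omega, by simp only []; omega⟩
    · exact ⟨_, g.footprint_fixed _ (Or.inl rfl), by simp only []; omega, by simp only []; omega⟩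
    · exact ⟨_, g.footprint_fixed _ (Or.inl rfl), by simp only []; omega, by simp only []; omega⟩
    · exact ⟨_, g.footprint_fixed _ (Or.inr (Or.inl rfl)), by simp only []; omega, by simp only []; omega⟩
    · exact ⟨_, g.footprint_fixed _ (Or.inr (Or.inr (Or.inl rfl))), by simp only []; omega, by simp only []; omega⟩
    · exact ⟨_, g.footprint_fixed _ (Or.inr (Or.inr (Or.inr (Or.inl rfl)))), by simp only []; omega, by simp only []; omega⟩
    · exact ⟨_, g.footprint_fixed _ (Or.inr (Or.inr (Or.inr (Or.inr (Or.inl rfl))))), by simp only []; omega,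
        by simp only []; omega⟩
    · exact ⟨_, g.footprint_fixed _ (Or.inr (Or.inr (Or.inr (Or.inr (Or.inr (Or.inl rfl)))))), by simp only []; omega,
        by simp only []; omega⟩
    · exact ⟨_, g.footprint_fixed _ (Or.inr (Or.inr (Or.inr (Or.inr (Or.inr (Or.inr rfl)))))), by simp only []; omega,
        by simp only []; omega⟩
  -- the arena layer: `temp_memory_required` and the four arena fields are not in the windows
  have hbusy : ADOBusy g.A' g.others' s.mem g.f g.sz := by
    apply (show ADOBusy g.A' g.others' v.mem g.f g.sz from hc.point.busy).transfer
    apply ObjEq.of_sameExcept same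
    · intro w hw
      simp only [ADO.wins, List.mem_cons, List.mem_nil_iff, or_false] at hw
      rcases hw with rfl | rfl <;> simp only [] <;> omega
    · intro w hw sp hsp
      simp only [ADO.wins, List.mem_cons, List.mem_nil_iff, or_false] at hw
      simp only [List.mem_cons, List.mem_nil_iff, or_false] at hsp
      rcases hw with rfl | rfl <;>
        rcases hsp with rfl | rfl | rfl | rfl | rfl | rfl | rfl | rfl | rfl <;> simp only [] <;> omega
  -- TB: the row-pointer table is kept
  have htb : TempRows s.mem g.TB g.C g.PRD := by
    apply hc.tb.frame
    apply Block.Kept.of_sameExcept same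
    · intro w hw
      simp only [List.mem_cons, List.mem_nil_iff, or_false] at hw
      rcases hw with rfl | rfl | rfl | rfl | rfl | rfl | rfl | rfl | rfl <;> simp only [] <;> omega
    · simp only []
      omega
  refine Common.of_frame hent rbp rsp code inv ?_ ?_ ?_ ?_ ?_ ?_ fr_f ?_ ?_ ?_ ?_ ?_ ?_ ?_ hfoot
    (hc.shadow.untouched untouched) bits hbusy htb (Nat.le_trans mu_le hc.mu_le)
  · rw [hslot _ _ (by u_omega)]
    exact hc.s_rbp
  · rw [hslot _ _ (by u_omega)]
    exact hc.s_r15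
  · rw [hslot _ _ (by u_omega)]
    exact hc.s_r14
  · rw [hslot _ _ (by u_omega)]
    exact hc.s_r13
  · rw [hslot _ _ (by u_omega)]
    exact hc.s_r12
  · rw [hslot _ _ (by u_omega)]
    exact hc.s_rbx
  · rw [hslot _ _ (by u_omega)]
    exact hc.fr_rb
  · rw [hslot _ _ (by u_omega)]
    exact hc.fr_ch
  · rw [hslot _ _ (by u_omega)]
    exact hc.fr_prd
  · rw [hslot _ _ (by u_omega)]
    exact hc.fr_w
  · rw [hslot _ _ (by u_omega)]
    exact hc.fr_rtype
  · rw [hslot _ _ (by u_omega)]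
    exact hc.fr_pcd
  · rw [hslot _ _ (by u_omega)]
    exact hc.fr_si

/-! ### Segment 7: the assertions at 0x10f36f and 0x10f40d -/

/-- **0x10f36f (`L.decode_residue.chk43`: `call __asan_load4_noabort` for `f->acc`), the first cut inside segment 7**: the join of
the `prep_huffman` arm (0x10f4a8 … 0x10f4b4 `jmp 10f361`) and of the direct path (`valid_bits > 9`), two instructions after the
join 0x10f361 (`mov r13, [rbp−0xb0] ; lea rdi, [r13+0x6e4]`). `v` is the state at the segment's entry (`At17`), `s` the present
state. The memory differs from the entry's only below the steady stack pointer, in the three scratch slots and in the bit reader's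
windows of `*f` (the footprint of `prep_huffman`); the frame and the loop invariant are those of `v` (`At17Mid1.common`). -/
structure At17Mid1 (u₀ : State) (g : G) (v s : State) : Prop where
  /-- at the check call of `f->acc` -/
  rip : s.rip = L.decode_residue.chk43
  /-- the steady stack pointer `rbp − 0xf0` -/
  rsp : s.reg .rsp = g.e.reg .rsp - 248
  /-- FR: `rbp = RA − 8` -/
  rbp : s.reg .rbp = g.e.reg .rsp - 8
  /-- `r12 = r`, the residue record (callee-saved over `prep_huffman`; read again at 0x10f456) -/
  r12 : s.reg .r12 = UInt64.ofNat g.r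
  /-- `r13 = f` (0x10f361 `mov r13, [rbp−0xb0]`; read at 0x10f374, 0x10f37b) -/
  r13 : s.reg .r13 = g.e.reg .rdi
  /-- `r14 = c = f->codebooks + r->classbook`, the class book (0x10f327 … 0x10f345; callee-saved over `prep_huffman`) -/
  r14 : s.reg .r14 = UInt64.ofNat (Residue.cbk v.mem g.f g.r)
  /-- r15 is the entry's (`r15d = pcount`, `DecodeA.r15` of `v`) -/
  r15 : s.reg .r15 = v.reg .r15
  /-- `rdi = &f->acc`, the argument of the check call (0x10f368 `lea rdi, [r13+0x6e4]`) -/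
  rdi : s.reg .rdi = g.e.reg .rdi + 1764
  /-- the image's text is unchanged -/
  code : CodeOK u₀ s.mem
  /-- DF = 0, the SSE exceptions masked -/
  inv : abiInv s
  /-- FR: `[rbp−0xb0] = f` (read at 0x10f3d0, 0x10f4d6; re-stored with the same value at 0x10f374) -/
  fr_f : UInt64.ofNat (s.mem.readLE (g.e.reg .rsp - 184) 8) = g.e.reg .rdi
  /-- what the segment has stored into so far: below the steady stack pointer, the scratch slots `[rbp−0xb8, rbp−0xa8)` and
  `[rbp−0x98, rbp−0x94)`, the bit reader's windows of `*f` -/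
  same : Mem.SameExcept
    [⟨(g.e.reg .rsp).toNat - 848, (g.e.reg .rsp).toNat - 248⟩,
     ⟨(g.e.reg .rsp).toNat - 192, (g.e.reg .rsp).toNat - 176⟩,
     ⟨(g.e.reg .rsp).toNat - 160, (g.e.reg .rsp).toNat - 156⟩,
     ⟨(g.e.reg .rdi).toNat + 48, (g.e.reg .rdi).toNat + 56⟩, ⟨(g.e.reg .rdi).toNat + 84, (g.e.reg .rdi).toNat + 96⟩,
     ⟨(g.e.reg .rdi).toNat + 136, (g.e.reg .rdi).toNat + 144⟩, ⟨(g.e.reg .rdi).toNat + 1484, (g.e.reg .rdi).toNat + 1749⟩,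
     ⟨(g.e.reg .rdi).toNat + 1752, (g.e.reg .rdi).toNat + 1784⟩] v.mem s.mem
  /-- no shadow byte has been written -/
  untouched : ShadowUntouched v.mem s.mem
  /-- the bit reader's invariant in the present memory (`prep_huffman`'s post, or the entry's through `reader_of_window`) -/
  bits : Bits g.Blk g.len s.mem g.f
  /-- μ not increased -/
  mu_le : mu s.mem g.f ≤ mu v.mem g.f

/-- **0x10f40d (`L.decode_residue.chk48`: `call __asan_load1_noabort` for `c->sparse`), the second cut inside segment 7**: the
join of the three ways DECODE_RAW ends — the return of `codebook_decode_scalar_raw` (0x10f4e2 `mov [rbp−0xb8], eax ; jmp 10f409`),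
the inline fast path (falls through at 0x10f403), the inline `valid_bits < 0` arm (0x10f4b9 … `jmp 10f409`) — one instruction
after the join 0x10f409 (`lea rdi, [r14+0x1b]`). As `At17Mid1`, without r13 (dead: next written at 0x10f489), and the 4-byte
scratch slot `[rbp−0xb8]` holds the DECODE_RAW result `q` (`−1`, or `0 ≤ q < N(c)` with `N(c)` read in the present memory). -/
structure At17Mid2 (u₀ : State) (g : G) (v s : State) : Prop where
  /-- at the check call of `c->sparse` -/
  rip : s.rip = L.decode_residue.chk48
  /-- the steady stack pointer `rbp − 0xf0` -/
  rsp : s.reg .rsp = g.e.reg .rsp - 248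
  /-- FR: `rbp = RA − 8` -/
  rbp : s.reg .rbp = g.e.reg .rsp - 8
  /-- `r12 = r`, the residue record (read at 0x10f456, 0x10f467; `At23.r12`) -/
  r12 : s.reg .r12 = UInt64.ofNat g.r
  /-- `r14 = c`, the class book (read at 0x10f412, 0x10f419, 0x10f430) -/
  r14 : s.reg .r14 = UInt64.ofNat (Residue.cbk v.mem g.f g.r)
  /-- r15 is the entry's (`r15d = pcount`) -/
  r15 : s.reg .r15 = v.reg .r15
  /-- `rdi = &c->sparse`, the argument of the check call (0x10f409 `lea rdi, [r14+0x1b]`) -/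
  rdi : s.reg .rdi = UInt64.ofNat (Residue.cbk v.mem g.f g.r) + 27
  /-- the image's text is unchanged -/
  code : CodeOK u₀ s.mem
  /-- DF = 0, the SSE exceptions masked -/
  inv : abiInv s
  /-- FR: `[rbp−0xb0] = f` -/
  fr_f : UInt64.ofNat (s.mem.readLE (g.e.reg .rsp - 184) 8) = g.e.reg .rdi
  /-- `[rbp−0xb8] = q` (4 bytes, as an unsigned 32-bit pattern), the result of DECODE_RAW: stored at 0x10f3a0 (the fast table's
  entry, ≥ 0 on the path that keeps it), 0x10f4c4 (−1) or 0x10f4e2 (the callee's eax); read at 0x10f425 and 0x10f447 -/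
  var : ∃ q : Int, DecodeRawResult s.mem (Residue.cbk v.mem g.f g.r) q ∧
    s.mem.readLE (g.e.reg .rsp - 192) 4 = (q % 2 ^ 32).toNat
  /-- what the segment has stored into so far (the windows of `At17Mid1.same`) -/
  same : Mem.SameExcept
    [⟨(g.e.reg .rsp).toNat - 848, (g.e.reg .rsp).toNat - 248⟩,
     ⟨(g.e.reg .rsp).toNat - 192, (g.e.reg .rsp).toNat - 176⟩,
     ⟨(g.e.reg .rsp).toNat - 160, (g.e.reg .rsp).toNat - 156⟩,
     ⟨(g.e.reg .rdi).toNat + 48, (g.e.reg .rdi).toNat + 56⟩, ⟨(g.e.reg .rdi).toNat + 84, (g.e.reg .rdi).toNat + 96⟩,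
     ⟨(g.e.reg .rdi).toNat + 136, (g.e.reg .rdi).toNat + 144⟩, ⟨(g.e.reg .rdi).toNat + 1484, (g.e.reg .rdi).toNat + 1749⟩,
     ⟨(g.e.reg .rdi).toNat + 1752, (g.e.reg .rdi).toNat + 1784⟩] v.mem s.mem
  /-- no shadow byte has been written -/
  untouched : ShadowUntouched v.mem s.mem
  /-- the bit reader's invariant in the present memory -/
  bits : Bits g.Blk g.len s.mem g.f
  /-- μ not increased -/
  mu_le : mu s.mem g.f ≤ mu v.mem g.f

/-- **The eight windows of the two cut assertions are among the nine of `Common.carry_decode`** (the ninth, the rows of the temp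
block, is only needed after the slot store of the last child). -/
theorem carry_decode_nine {g : G} {m m' : Mem}
    (h : Mem.SameExcept
      [⟨(g.e.reg .rsp).toNat - 848, (g.e.reg .rsp).toNat - 248⟩,
       ⟨(g.e.reg .rsp).toNat - 192, (g.e.reg .rsp).toNat - 176⟩,
       ⟨(g.e.reg .rsp).toNat - 160, (g.e.reg .rsp).toNat - 156⟩,
       ⟨(g.e.reg .rdi).toNat + 48, (g.e.reg .rdi).toNat + 56⟩, ⟨(g.e.reg .rdi).toNat + 84, (g.e.reg .rdi).toNat + 96⟩,
       ⟨(g.e.reg .rdi).toNat + 136, (g.e.reg .rdi).toNat + 144⟩, ⟨(g.e.reg .rdi).toNat + 1484, (g.e.reg .rdi).toNat + 1749⟩,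
       ⟨(g.e.reg .rdi).toNat + 1752, (g.e.reg .rdi).toNat + 1784⟩] m m') :
    Mem.SameExcept
      [⟨(g.e.reg .rsp).toNat - 848, (g.e.reg .rsp).toNat - 248⟩,
       ⟨(g.e.reg .rsp).toNat - 192, (g.e.reg .rsp).toNat - 176⟩,
       ⟨(g.e.reg .rsp).toNat - 160, (g.e.reg .rsp).toNat - 156⟩,
       ⟨(g.e.reg .rdi).toNat + 48, (g.e.reg .rdi).toNat + 56⟩, ⟨(g.e.reg .rdi).toNat + 84, (g.e.reg .rdi).toNat + 96⟩,
       ⟨(g.e.reg .rdi).toNat + 136, (g.e.reg .rdi).toNat + 144⟩, ⟨(g.e.reg .rdi).toNat + 1484, (g.e.reg .rdi).toNat + 1749⟩,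
       ⟨(g.e.reg .rdi).toNat + 1752, (g.e.reg .rdi).toNat + 1784⟩,
       ⟨g.TB.base + 8 * g.C, g.TB.base + g.TB.size⟩] m m' := by
  apply h.mono
  intro w hw a h1 h2
  exact ⟨w, List.mem_append_left [_] hw, h1, h2⟩

/-- **COMMON at the first cut**, from COMMON at the segment's entry. -/
theorem At17Mid1.common {u₀ : State} {g : G} {v s : State} (hent : Entered u₀ g) (hc : Common u₀ g v)
    (hm : At17Mid1 u₀ g v s) : Common u₀ g s :=
  hc.carry_decode hent hm.rsp hm.rbp hm.code hm.inv hm.fr_f (carry_decode_nine hm.same) hm.untouched hm.bits hm.mu_le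

/-- **COMMON at the second cut**, from COMMON at the segment's entry. -/
theorem At17Mid2.common {u₀ : State} {g : G} {v s : State} (hent : Entered u₀ g) (hc : Common u₀ g v)
    (hm : At17Mid2 u₀ g v s) : Common u₀ g s :=
  hc.carry_decode hent hm.rsp hm.rbp hm.code hm.inv hm.fr_f (carry_decode_nine hm.same) hm.untouched hm.bits hm.mu_le

/-! ### Segment 7: the children's claims -/

/-- **decode_residue.7a** (0x10f314 … 0x10f368 + 0x10f4a8 … 0x10f4b4, 18 instructions; C 2216, 2218
`if (f->valid_bits <= 9) prep_huffman(f)`): the class book's address `c = f->codebooks + r->classbook` (two check sites: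
`f->codebooks`, `r->classbook`; `imul rax, 0x848`), the test of `f->valid_bits` (one check site), the `prep_huffman` arm
(`cut18` = 0x10f4b4 is its return address), the join 0x10f361, up to the check call of `f->acc`. -/
def Seg7a (Lay : Layout) (μ : Microarch) (u₀ : State) : Prop :=
  ∀ g : G, Entered u₀ g →
    ∀ cs pcount v, At17 u₀ g cs pcount v →
      ReachVia Lay μ WayInv v (fun s => At17Mid1 u₀ g v s)

/-- **decode_residue.7b** (0x10f36f … 0x10f409 + 0x10f4b9 … 0x10f4ce + 0x10f4d3 … 0x10f4e8, 41 instructions; C 2218, DECODE_RAW of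
`DECODE(q,f,c)`): `f->acc`, the fast table `c->fast_huffman[acc & 1023]` (two check sites); a negative entry:
`codebook_decode_scalar_raw(f, c)` (`cut19` = 0x10f4e2 is its return address); else the inline path: `c->codeword_lengths[x]`
(two check sites), `acc >>= len`, `valid_bits -= len` (one check site), and `valid_bits < 0` ⇒ `valid_bits = 0`, the result −1.
From the check call of `f->acc` to the check call of `c->sparse`, the result in the scratch slot `[rbp−0xb8]`. -/
def Seg7b (Lay : Layout) (μ : Microarch) (u₀ : State) : Prop :=
  ∀ g : G, Entered u₀ g →
    ∀ cs pcount v, At17 u₀ g cs pcount v →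
      ∀ s, At17Mid1 u₀ g v s →
        ReachVia Lay μ WayInv s (fun s' => At17Mid2 u₀ g v s')

/-- **decode_residue.7c** (0x10f40d … 0x10f4a3, 34 instructions; C 2219–2221): `if (c->sparse) q = c->sorted_values[q]` (three
check sites: `c->sparse`, `c->sorted_values`, the entry), `if (q == EOP) goto done` (the trampoline 0x10fb14),
`part_classdata[0][class_set] = r->classdata[q]` (four check sites: `r->classdata`, the row pointer `part_classdata[0]`,
`classdata[q]`, the store into the slot). To the i-loop's entry with FILL(0, class_set + 1), or to the trampoline. No contract
call. -/
def Seg7c (Lay : Layout) (μ : Microarch) (u₀ : State) : Prop :=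
  ∀ g : G, Entered u₀ g →
    ∀ cs pcount v, At17 u₀ g cs pcount v →
      ∀ s, At17Mid2 u₀ g v s →
        ReachVia Lay μ WayInv s (fun v' => At23 u₀ g 0 cs pcount v' ∨ At38 u₀ g v')

/-! ### Segment 7: the composition -/

/-- **Segment 7 from its three parts**: 7a = the class book and the `prep_huffman` arm, 7b = DECODE_RAW, 7c = the translation of
a sparse book, `q == EOP` and the store. A chain of `ReachVia.trans`: no loop, no measure. -/
theorem Seg7.of_parts {Lay : Layout} {μ : Microarch} {u₀ : State} (ha : Seg7a Lay μ u₀) (hb : Seg7b Lay μ u₀)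
    (hc : Seg7c Lay μ u₀) : Seg7 Lay μ u₀ := by
  intro g hent cs pcount v hat
  refine ReachVia.trans (ha g hent cs pcount v hat) ?_
  intro s hs
  refine ReachVia.trans (hb g hent cs pcount v hat s hs) ?_
  intro s' hs'
  exact hc g hent cs pcount v hat s' hs'

end DecodeResidue

end Vorbis.Spec
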